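-- pv_equiv track=rewrite | github.com/cem-kara/RADPYS | app/usecases/policy/tum_rol_modulleri_getir.py | execute
-- ===== SOURCE A (Python) =====
-- def execute(rows: list[dict]) -> dict[str, set[str] | None]:
--     """Policy satirlarindan rol-modul haritasi uretir."""
--     rol_map: dict[str, list[dict]] = {}
--     for row in rows:
--         rol_map.setdefault(row["rol"], []).append(row)
--
--     sonuc: dict[str, set[str] | None] = {}
--     for rol_adi, kayitlar in rol_map.items():
--         hepsi_izinli = all(int(k.get("izinli", 0)) for k in kayitlar)
--         if hepsi_izinli and rol_adi == "admin":
--             sonuc[rol_adi] = None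
--         else:
--             sonuc[rol_adi] = {
--                 k["modul_id"] for k in kayitlar if int(k.get("izinli", 0))
--             }
--     return sonuc
-- ===== SOURCE B (Python) =====
-- def execute(rows: list[dict]) -> dict[str, set[str] | None]:
--     """Policy satirlarindan rol-modul haritasi uretir (single pass, running aggregates)."""
--     state: dict[str, list] = {}  # rol -> [all_izinli_so_far, modules_so_far]
--     for row in rows:
--         st = state.get(row["rol"])
--         if st is None:
--             st = [True, set()]
--             state[row["rol"]] = st
--         izinli = bool(int(row.get("izinli", 0)))
--         st[0] = st[0] and izinli
--         if izinli:
--             st[1].add(row.get("modul_id"))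
--     return {
--         rol: None if st[0] and rol == "admin" else st[1]
--         for rol, st in state.items()
--     }
-- ===== Notes on version B (the rewrite author's own statement) =====
-- stated objective: alternative
-- what changed: Replaces A's two-phase group-then-aggregate (build a dict of per-role row lists, then run all() and a set comprehension over each group) with a single pass that maintains per-role running state (an AND-folded permitted flag and an incrementally grown module set via row.get), so the intermediate list-of-rows grouping disappears.
import Mathlib
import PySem

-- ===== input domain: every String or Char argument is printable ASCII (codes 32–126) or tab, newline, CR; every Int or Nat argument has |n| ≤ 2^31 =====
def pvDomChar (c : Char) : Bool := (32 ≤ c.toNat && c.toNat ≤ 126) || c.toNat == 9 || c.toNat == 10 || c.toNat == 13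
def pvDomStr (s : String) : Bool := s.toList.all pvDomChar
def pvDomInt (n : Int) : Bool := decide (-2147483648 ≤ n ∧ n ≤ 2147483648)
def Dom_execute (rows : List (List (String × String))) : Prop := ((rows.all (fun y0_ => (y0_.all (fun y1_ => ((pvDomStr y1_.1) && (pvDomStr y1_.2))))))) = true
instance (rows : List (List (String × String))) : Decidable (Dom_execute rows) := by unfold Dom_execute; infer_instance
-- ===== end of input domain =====

-- B folds the grouping and the aggregation of A into one pass with per-role running state
-- (flag AND-folded, module set grown incrementally); the intermediate per-role row lists disappear.

-- shared row accessors (a row is a Python dict; lookup = first match, totalised with a default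
-- where Python would raise KeyError/ValueError — Pre_execute excludes those inputs)
def rowGet? (row : List (String × String)) (k : String) : Option String :=
  (PySem.Dict.mk row).get? k

def rowRol (row : List (String × String)) : String := (rowGet? row "rol").getD ""

-- A reads row["modul_id"] (KeyError when missing — outside Pre_); B reads row.get("modul_id").
-- The "" default only matters where the surrounding set is never emitted or Pre_ is violated.
def rowModul (row : List (String × String)) : String := (rowGet? row "modul_id").getD ""

-- int(row.get("izinli", 0)) : missing key defaults to 0; a parse failure is a ValueError (outside Pre_)
def rowIz (row : List (String × String)) : Int :=
  match rowGet? row "izinli" with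
  | none => 0
  | some s => (PySem.Int.ofStr? s).getD 0

-- truthiness of int(row.get("izinli", 0))
def rowOk (row : List (String × String)) : Bool := rowIz row != 0

-- ===== PORT A =====
-- rol_map: dict rol -> list of its rows, built with setdefault(...).append(row)
def aRolMap (rows : List (List (String × String))) :
    PySem.Dict String (List (List (String × String))) :=
  rows.foldl (fun d row => d.modify (rowRol row) [] (fun ks => ks ++ [row])) PySem.Dict.empty

def execute (rows : List (List (String × String))) : List (String × Option (List String)) :=
  (aRolMap rows).items.foldl (fun sonuc p =>
    let hepsiIzinli := p.2.all (fun k => rowOk k)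
    if hepsiIzinli && p.1 == "admin" then
      sonuc ++ [(p.1, none)]
    else
      sonuc ++ [(p.1, some (PySem.Set.ofList ((p.2.filter (fun k => rowOk k)).map rowModul)))]) []

-- ===== PORT B =====
-- per-role running state: (rol, all_izinli so far, module set so far); state.get/insert + in-place list update
def bUpd (st : List (String × Bool × List String)) (r : String) (ok : Bool) (m : String) :
    List (String × Bool × List String) :=
  match st with
  | [] => [(r, ok, if ok then PySem.Set.add PySem.Set.empty m else PySem.Set.empty)]
  | (r', f, s) :: rest =>
    if r' == r then (r', f && ok, if ok then PySem.Set.add s m else s) :: rest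
    else (r', f, s) :: bUpd rest r ok m

def execute_alt (rows : List (List (String × String))) : List (String × Option (List String)) :=
  let st := rows.foldl (fun st row => bUpd st (rowRol row) (rowOk row) (rowModul row)) []
  st.map (fun q => if q.2.1 && q.1 == "admin" then (q.1, none) else (q.1, some q.2.2))

-- ===== PRECONDITION & SPEC =====
-- Pre_ excludes exactly the inputs on which A raises: a row missing "rol" (KeyError), an
-- unparsable "izinli" (ValueError), and a permitted row missing "modul_id" whose set
-- comprehension is actually evaluated (KeyError) — i.e. unless that row's role is "admin" with
-- every admin row permitted, in which case A returns None without reading "modul_id" and stays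
-- inside Pre_ (B matches it there).
def Pre_execute (rows : List (List (String × String))) : Prop :=
  ∀ row ∈ rows,
    (rowGet? row "rol").isSome = true ∧
    ((rowGet? row "izinli").all (fun s => (PySem.Int.ofStr? s).isSome)) = true ∧
    (rowOk row = true → (rowGet? row "modul_id").isSome = true ∨
      (rowRol row = "admin" ∧
        (rows.all (fun r => !(rowRol r == "admin") || rowOk r)) = true))
instance (rows : List (List (String × String))) : Decidable (Pre_execute rows) := by
  unfold Pre_execute; infer_instance

def pvWitness_execute : (List (List (String × String))) :=
  [[("rol", "admin"), ("izinli", "1")],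
   [("rol", "user"), ("izinli", "0")],
   [("rol", "user"), ("modul_id", "m2"), ("izinli", "1")]]

def Spec_execute (rows : List (List (String × String))) (out : List (String × Option (List String))) : Prop := out = execute_alt rows
instance (rows : List (List (String × String))) (out : List (String × Option (List String))) : Decidable (Spec_execute rows out) := by unfold Spec_execute; infer_instance

-- ===== CLAIM (what is proved, stated in full; the proofs are below) =====
def Claim_equal_execute : Prop := ∀ (rows : List (List (String × String))), Dom_execute rows → Pre_execute rows → Spec_execute rows (execute rows)

-- ===== LEMMAS AND PROOFS =====

-- per-group aggregate: what B's running state holds for a finished A-side group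
def aggE (p : String × List (List (String × String))) : String × Bool × List String :=
  (p.1, p.2.all (fun k => rowOk k),
   PySem.Set.ofList ((p.2.filter (fun k => rowOk k)).map rowModul))

def absD (d : PySem.Dict String (List (List (String × String)))) :
    List (String × Bool × List String) :=
  d.items.map aggE

theorem bUpd_absD (l : List (String × List (List (String × String))))
    (hnd : (l.map Prod.fst).Nodup) (row : List (String × String)) :
    bUpd (l.map aggE) (rowRol row) (rowOk row) (rowModul row)
      = absD ((PySem.Dict.mk l).modify (rowRol row) [] (fun ks => ks ++ [row])) := by
  induction l with
  | nil =>
    simp only [absD, PySem.Dict.modify, List.map_nil, bUpd]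
    have hc : (PySem.Dict.mk ([] : List (String × List (List (String × String))))).contains (rowRol row) = false := by
      simp [PySem.Dict.contains_mk]
    have hg : (PySem.Dict.mk ([] : List (String × List (List (String × String))))).getD (rowRol row) [] = [] := rfl
    simp only [PySem.Dict.items_insert, hc, Bool.false_eq_true, if_false, hg]
    by_cases h : rowOk row = true <;>
      simp [h, aggE, PySem.Set.add, PySem.Set.empty, PySem.Set.ofList]
  | cons q rest ih =>
    obtain ⟨k1, v1⟩ := q
    simp only [List.map_cons, List.nodup_cons] at hnd
    by_cases h : (k1 == rowRol row) = true
    · -- head already carries the row's role; by Nodup no later entry does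
      have hk1 : k1 = rowRol row := by simpa using h
      have hcontains : (PySem.Dict.mk ((k1, v1) :: rest)).contains (rowRol row) = true := by
        simp [PySem.Dict.contains_mk, h]
      have hgetD : (PySem.Dict.mk ((k1, v1) :: rest)).getD (rowRol row) [] = v1 := by
        simp [PySem.Dict.getD_eq_get?_getD, PySem.Dict.get?_mk_cons, h]
      have hne2 : ∀ p ∈ rest, ¬ (p.1 == rowRol row) = true := by
        intro p hp hpr
        have hmem : p.1 ∈ rest.map Prod.fst := List.mem_map_of_mem hp
        rw [(by simpa using hpr : p.1 = rowRol row), ← hk1] at hmem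
        exact hnd.1 hmem
      have hrest : rest.map (fun p => if p.1 == rowRol row then (rowRol row, v1 ++ [row]) else p) = rest := by
        rw [List.map_congr_left (g := id) (fun p hp => by simp [hne2 p hp]), List.map_id]
      simp only [absD, PySem.Dict.modify, PySem.Dict.items_insert, hcontains, if_true,
        hgetD, List.map_cons, aggE, bUpd, h, if_true]
      rw [hrest]
      refine congrArg (fun x => x :: rest.map aggE) ?_
      by_cases hok : rowOk row = true <;>
        simp [hk1, hok, List.filter_append, List.all_append, PySem.Set.ofList_append_singleton]
    · -- head carries another role: both sides keep it and recurse on the tail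
      have hne : (k1 == rowRol row) = false := by simpa using h
      have hk1ne : ¬ k1 = rowRol row := by simpa using h
      have hgetD : (PySem.Dict.mk ((k1, v1) :: rest)).getD (rowRol row) [] = (PySem.Dict.mk rest).getD (rowRol row) [] := by
        simp [PySem.Dict.getD_eq_get?_getD, PySem.Dict.get?_mk_cons, hne]
      have hcc : (PySem.Dict.mk ((k1, v1) :: rest)).contains (rowRol row) = (PySem.Dict.mk rest).contains (rowRol row) := by
        simp [PySem.Dict.contains_mk, hne]
      have hitems : ((PySem.Dict.mk ((k1, v1) :: rest)).insert (rowRol row) ((PySem.Dict.mk rest).getD (rowRol row) [] ++ [row])).items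
          = (k1, v1) :: ((PySem.Dict.mk rest).insert (rowRol row) ((PySem.Dict.mk rest).getD (rowRol row) [] ++ [row])).items := by
        simp only [PySem.Dict.items_insert, hcc]
        split_ifs with hc
        · simp [hk1ne]
        · simp
      simp only [absD, PySem.Dict.modify] at ih ⊢
      rw [hgetD, hitems]
      simp only [List.map_cons, aggE, bUpd, hne, Bool.false_eq_true, if_false]
      exact congrArg _ (ih hnd.2)

theorem foldl_state (rows : List (List (String × String)))
    (d : PySem.Dict String (List (List (String × String)))) (hnd : d.keys.Nodup) :
    rows.foldl (fun st row => bUpd st (rowRol row) (rowOk row) (rowModul row)) (absD d)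
      = absD (rows.foldl (fun d row => d.modify (rowRol row) [] (fun ks => ks ++ [row])) d) := by
  induction rows generalizing d with
  | nil => rfl
  | cons row rest ih =>
    have h1 : bUpd (absD d) (rowRol row) (rowOk row) (rowModul row)
        = absD (d.modify (rowRol row) [] (fun ks => ks ++ [row])) := by
      obtain ⟨l⟩ := d
      exact bUpd_absD l (by simpa [PySem.Dict.keys] using hnd) row
    have h2 : (d.modify (rowRol row) [] (fun ks => ks ++ [row])).keys.Nodup := by
      show (d.insert (rowRol row) (d.getD (rowRol row) [] ++ [row])).keys.Nodup
      by_cases hc : d.contains (rowRol row) = true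
      · rw [PySem.Dict.keys_insert_of_contains d _ hc]
        exact hnd
      · have hc0 : d.contains (rowRol row) = false := by simpa using hc
        have hm : rowRol row ∉ d.keys := by
          rw [PySem.Dict.contains_eq_decide_mem_keys] at hc0
          simpa using hc0
        rw [PySem.Dict.keys_insert_of_not_contains d _ hc0]
        refine hnd.append (List.nodup_singleton _) ?_
        intro a ha hb
        simp only [List.mem_singleton] at hb
        exact hm (hb ▸ ha)
    simp only [List.foldl_cons, h1, ih _ h2]

theorem execute_eq_alt (rows : List (List (String × String))) :
    execute rows = execute_alt rows := by
  unfold execute execute_alt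
  have hst : rows.foldl (fun st row => bUpd st (rowRol row) (rowOk row) (rowModul row)) []
      = absD (aRolMap rows) := by
    have := foldl_state rows PySem.Dict.empty (by simp)
    simpa [absD, PySem.Dict.empty, aRolMap] using this
  rw [hst]
  generalize (aRolMap rows) = d
  obtain ⟨l⟩ := d
  simp only [absD]
  induction l using List.reverseRecOn with
  | nil => rfl
  | append_singleton rest p ih =>
    simp only [List.map_append, List.foldl_append, List.map_cons, List.map_nil,
      List.foldl_cons, List.foldl_nil, ih, aggE]
    by_cases h : (p.2.all (fun k => rowOk k) && p.1 == "admin") = true <;> simp [h]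

-- ===== VERDICT (by name: the statement is the Claim_ definition above) =====
theorem execute_spec : Claim_equal_execute := by
  intro rows _ _
  unfold Spec_execute
  exact execute_eq_alt rows
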